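-- pv_equiv track=rewrite | github.com/lukelookluck/algorithm_exam | 코테 11번가/문제 1.py | solution
-- ===== SOURCE A (Python) =====
-- def solution(S):
--     len_S = len(S)
--     my_stack = 'aa'
--
--     a_cnt = 0
--     for s in S:
--         if s == 'a':
--             a_cnt += 1
--         if a_cnt >= 3:
--             return -1
--         if s != 'a':
--             a_cnt = 0
--             my_stack += s
--             my_stack += 'aa'
--     return len(my_stack)-len_S
-- ===== SOURCE B (Python) =====
-- def solution(S):
--     if 'aaa' in S:
--         return -1
--     return 2 + 2 * len(S) - 3 * S.count('a')
-- ===== Notes on version B (the rewrite author's own statement) =====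
-- stated objective: simpler
-- what changed: Replaced the character loop with its stack-string building and run counter by a closed form: a single substring containment test for the failure case, then an arithmetic formula in the length and the count of the letter a.
import Mathlib
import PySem

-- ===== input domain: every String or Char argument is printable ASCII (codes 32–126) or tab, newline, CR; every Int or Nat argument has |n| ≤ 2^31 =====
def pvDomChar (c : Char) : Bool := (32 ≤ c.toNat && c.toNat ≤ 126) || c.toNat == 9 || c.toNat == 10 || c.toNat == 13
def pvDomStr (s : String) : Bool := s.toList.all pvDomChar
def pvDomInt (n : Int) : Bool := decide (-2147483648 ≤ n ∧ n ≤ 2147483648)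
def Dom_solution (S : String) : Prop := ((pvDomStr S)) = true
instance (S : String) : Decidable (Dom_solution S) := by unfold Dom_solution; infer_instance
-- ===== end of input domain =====

-- B replaces A's character loop (run counter + stack-string building) with a closed form:
-- one 'aaa' substring test, then 2 + 2*len(S) - 3*S.count('a').

-- ===== PORT A =====
-- the for-loop of A: state = (a_cnt, my_stack); early 'return -1' when a_cnt >= 3
def solutionLoop (cs : List Char) (a_cnt : Int) (my_stack : List Char) (len_S : Int) : Int :=
  match cs with
  | [] => (my_stack.length : Int) - len_S
  | s :: rest =>
    let a_cnt' := if s == 'a' then a_cnt + 1 else a_cnt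
    if a_cnt' ≥ 3 then -1
    else if s != 'a' then solutionLoop rest 0 (my_stack ++ [s] ++ ['a', 'a']) len_S
    else solutionLoop rest a_cnt' my_stack len_S

def solution (S : String) : Int :=
  solutionLoop S.toList 0 ['a', 'a'] (PySem.Str.len S)

-- ===== PORT B =====
def solution_alt (S : String) : Int :=
  if PySem.Str.isIn "aaa" S then -1
  else 2 + 2 * PySem.Str.len S - 3 * (PySem.Str.count S "a" : Int)

-- ===== PRECONDITION & SPEC =====
def Spec_solution (S : String) (out : Int) : Prop := out = solution_alt S
instance (S : String) (out : Int) : Decidable (Spec_solution S out) := by unfold Spec_solution; infer_instance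

-- ===== CLAIM (what is proved, stated in full; the proofs are below) =====
def Claim_equal_solution : Prop := ∀ (S : String), Dom_solution S → Spec_solution S (solution S)

-- ===== LEMMAS AND PROOFS =====

-- proof-side helper: does A's loop, started with a run counter k, hit 'a_cnt >= 3'?
def hasRun (cs : List Char) (k : Int) : Bool :=
  match cs with
  | [] => false
  | c :: rest => if c == 'a' then (decide (k + 1 ≥ 3) || hasRun rest (k + 1)) else hasRun rest 0

-- single-character substring count is character count
theorem count_go_single (c : Char) : ∀ (fuel : Nat) (l : List Char) (acc : Nat),
    l.length ≤ fuel → PySem.Chars.count.go [c] fuel l acc = acc + l.count c := by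
  intro fuel
  induction fuel with
  | zero =>
    intro l acc h
    have : l = [] := List.eq_nil_of_length_eq_zero (Nat.le_zero.mp h)
    subst this; simp [PySem.Chars.count.go]
  | succ n ih =>
    intro l acc h
    match l with
    | [] => simp [PySem.Chars.count.go]
    | x :: t =>
      simp only [PySem.Chars.count.go]
      simp only [List.length_cons] at h
      by_cases hx : x = c
      · subst hx
        have hp : List.isPrefixOf [x] (x :: t) = true := by
          simp [List.isPrefixOf]
        rw [if_pos hp]
        rw [ih _ _ (by simpa using Nat.le_of_succ_le_succ h)]
        simp
        omega
      · have hcx : ¬ c = x := fun hh => hx hh.symm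
        have hp : List.isPrefixOf [c] (x :: t) = false := by
          simp [List.isPrefixOf]
          exact hcx
        rw [hp]
        simp only [Bool.false_eq_true, if_false]
        rw [ih _ _ (Nat.le_of_succ_le_succ h)]
        have : List.count c (x :: t) = List.count c t := by
          simp [hx]
        rw [this]

theorem count_single (c : Char) (cs : List Char) :
    PySem.Chars.count cs [c] = cs.count c := by
  simp [PySem.Chars.count]
  simpa using count_go_single c cs.length cs 0 le_rfl

-- hasRun with credit k (0 ≤ k ≤ 2) ↔ an 'a'-prefix of length 3-k, or 'aaa' occurs inside
theorem hasRun_iff : ∀ (cs : List Char),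
    (hasRun cs 0 = true ↔ ['a','a','a'] <:+: cs) ∧
    (hasRun cs 1 = true ↔ (['a','a'] <+: cs ∨ ['a','a','a'] <:+: cs)) ∧
    (hasRun cs 2 = true ↔ (['a'] <+: cs ∨ ['a','a','a'] <:+: cs)) := by
  intro cs
  induction cs with
  | nil => refine ⟨?_, ?_, ?_⟩ <;> simp [hasRun]
  | cons c rest ih =>
    obtain ⟨ih0, ih1, ih2⟩ := ih
    have habs : ['a','a'] <+: rest → ['a'] <+: rest :=
      fun h => List.IsPrefix.trans ⟨['a'], rfl⟩ h
    by_cases hc : c = 'a'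
    · subst hc
      have hEq : ∀ k : Int, hasRun ('a' :: rest) k = (decide (k + 1 ≥ 3) || hasRun rest (k + 1)) := by
        intro k; simp [hasRun]
      refine ⟨?_, ?_, ?_⟩
      · rw [hEq]; norm_num
        rw [ih1, List.infix_cons_iff]
        simp [List.cons_prefix_cons]
      · rw [hEq]; norm_num
        rw [ih2, List.infix_cons_iff]
        simp only [List.cons_prefix_cons, true_and]
        constructor
        · rintro (h | h)
          · exact Or.inl h
          · exact Or.inr (Or.inr h)
        · rintro (h | h | h)
          · exact Or.inl h
          · exact Or.inl (habs h)
          · exact Or.inr h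
      · rw [hEq]; norm_num
    · have hc' : ¬ ('a' = c) := fun h => hc h.symm
      have hEq : ∀ k : Int, hasRun (c :: rest) k = hasRun rest 0 := by
        intro k; simp [hasRun, hc]
      refine ⟨?_, ?_, ?_⟩ <;>
        rw [hEq] <;>
        rw [List.infix_cons_iff] <;>
        simp [List.cons_prefix_cons, hc', ih0]

-- the loop result, as a closed form over the remaining characters
theorem loop_closed : ∀ (cs : List Char) (a_cnt : Int) (stack : List Char) (len_S : Int),
    0 ≤ a_cnt → a_cnt ≤ 2 →
    solutionLoop cs a_cnt stack len_S =
      if hasRun cs a_cnt then -1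
      else ((stack.length : Int) + 3 * (cs.countP (fun x => x ≠ 'a')) - len_S) := by
  intro cs
  induction cs with
  | nil => intro a_cnt stack len_S _ _; simp [solutionLoop, hasRun]
  | cons c rest ih =>
    intro a_cnt stack len_S h0 h2
    by_cases hc : c = 'a'
    · subst hc
      have hstep : solutionLoop ('a' :: rest) a_cnt stack len_S =
          if a_cnt + 1 ≥ 3 then -1 else solutionLoop rest (a_cnt + 1) stack len_S := by
        simp [solutionLoop]
      have hrun : hasRun ('a' :: rest) a_cnt = (decide (a_cnt + 1 ≥ 3) || hasRun rest (a_cnt + 1)) := by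
        simp [hasRun]
      rw [hstep, hrun]
      by_cases h3 : a_cnt + 1 ≥ 3
      · rw [if_pos h3]
        have : decide (a_cnt + 1 ≥ 3) = true := by simpa using h3
        simp [this]
      · rw [if_neg h3]
        have hd : decide (a_cnt + 1 ≥ 3) = false := by simpa using h3
        rw [hd, Bool.false_or]
        rw [ih (a_cnt + 1) stack len_S (by omega) (by omega)]
        simp
    · have hstep : solutionLoop (c :: rest) a_cnt stack len_S =
          if a_cnt ≥ 3 then -1 else solutionLoop rest 0 (stack ++ [c] ++ ['a', 'a']) len_S := by
        simp [solutionLoop, hc]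
      have hrun : hasRun (c :: rest) a_cnt = hasRun rest 0 := by
        simp [hasRun, hc]
      rw [hstep, hrun, if_neg (by omega)]
      rw [ih 0 _ len_S le_rfl (by omega)]
      by_cases hr : hasRun rest 0
      · simp [hr]
      · simp only [hr, Bool.false_eq_true, if_false]
        simp [hc]
        ring

-- ===== VERDICT (by name: the statement is the Claim_ definition above) =====
theorem solution_spec : Claim_equal_solution := by
  unfold Claim_equal_solution
  intro S _
  unfold Spec_solution solution solution_alt
  rw [loop_closed S.toList 0 ['a','a'] (PySem.Str.len S) le_rfl (by omega)]
  have hin : (PySem.Str.isIn "aaa" S = true) ↔ hasRun S.toList 0 = true := by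
    rw [PySem.Str.isIn_iff_infix]
    exact ((hasRun_iff S.toList).1).symm
  have hcnt : (PySem.Str.count S "a" : Int) = (S.toList.count 'a' : Int) := by
    rw [PySem.Str.count_eq]
    have h1 : ("a" : String).toList = ['a'] := rfl
    rw [h1, count_single]
  have hlen : PySem.Str.len S = (S.toList.length : Int) := by
    simp [PySem.Str.len_eq]
  have hsplit : S.toList.countP (fun x => x ≠ 'a') + S.toList.count 'a' = S.toList.length := by
    classical
    rw [List.count]
    have := List.length_eq_countP_add_countP (p := fun x : Char => x ≠ 'a') (l := S.toList)
    rw [this]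
    congr 1
    apply List.countP_congr
    intro x _
    simp
  by_cases h : hasRun S.toList 0 = true
  · rw [if_pos h, if_pos (hin.mpr h)]
  · rw [if_neg h, if_neg (fun hh => h (hin.mp hh))]
    rw [hcnt, hlen]
    have : (S.toList.countP (fun x => x ≠ 'a') : Int) = (S.toList.length : Int) - (S.toList.count 'a' : Int) := by
      omega
    rw [this]
    norm_num
    ring
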